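-- pv_equiv track=rewrite | github.com/IvannaTUpad/UTN-TUPaDProgramacion1 | TrabajoPracticoIntegrador/Prueba.py | buscar_paises_por_nombre
-- ===== SOURCE A (Python) =====
-- def buscar_paises_por_nombre(paises, termino):
--     termino = termino.strip().lower()
--     exactos = []
--     parciales = []
--     for pais in paises:
--         nombre = pais["nombre"].strip().lower()
--         if nombre == termino:
--             exactos.append(pais)
--         elif termino in nombre:
--             parciales.append(pais)
--     return exactos + parciales
-- ===== SOURCE B (Python) =====
-- def buscar_paises_por_nombre(paises, termino):
--     termino = termino.strip().lower()
--     coincidencias = [p for p in paises if termino in p["nombre"].strip().lower()]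
--     return sorted(coincidencias, key=lambda p: p["nombre"].strip().lower() != termino)
-- ===== Notes on version B (the rewrite author's own statement) =====
-- stated objective: alternative
-- what changed: B collects all substring matches with a single filter and then brings exact matches to the front by a stable sort on the boolean key 'not an exact match', instead of A's loop classifying into two accumulator lists concatenated at the end.
import Mathlib
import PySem

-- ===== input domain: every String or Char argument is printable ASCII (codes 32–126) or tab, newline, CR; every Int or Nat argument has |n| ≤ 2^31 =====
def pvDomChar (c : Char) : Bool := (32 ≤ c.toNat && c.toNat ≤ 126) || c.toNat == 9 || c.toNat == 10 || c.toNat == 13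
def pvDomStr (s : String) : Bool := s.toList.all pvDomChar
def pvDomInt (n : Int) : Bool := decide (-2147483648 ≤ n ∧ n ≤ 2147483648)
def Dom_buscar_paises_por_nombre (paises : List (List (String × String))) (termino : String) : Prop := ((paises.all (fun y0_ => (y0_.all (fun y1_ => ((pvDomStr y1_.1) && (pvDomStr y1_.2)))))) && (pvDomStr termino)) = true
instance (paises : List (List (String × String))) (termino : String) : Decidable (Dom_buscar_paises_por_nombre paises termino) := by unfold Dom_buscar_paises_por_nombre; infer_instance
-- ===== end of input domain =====

-- B replaces A's single classifying loop (two accumulators) by one substring-filter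
-- followed by a stable sort on the boolean key "not an exact match"; alternative decomposition, same results.


-- shared dict-access primitive: pais["nombre"] (first match; Pre_ guarantees the key exists)
def pvNombre (pais : List (String × String)) : String :=
  (((pais.find? (fun kv => kv.1 == "nombre")).map (·.2)).getD "")

-- ===== PORT A =====
-- single loop classifying each pais into (exactos, parciales), then exactos ++ parciales
def buscar_paises_por_nombre (paises : List (List (String × String))) (termino : String) : List (List (String × String)) :=
  let t := PySem.Str.lower (PySem.Str.strip termino)
  let ep := paises.foldl (fun (st : List (List (String × String)) × List (List (String × String))) pais =>
    let nombre := PySem.Str.lower (PySem.Str.strip (pvNombre pais))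
    if nombre == t then (st.1 ++ [pais], st.2)
    else if PySem.Str.isIn t nombre then (st.1, st.2 ++ [pais])
    else st) ([], [])
  ep.1 ++ ep.2

-- ===== PORT B =====
-- filter all substring matches, then a stable sort on the boolean key
-- (Python's bool key False < True is ported as Lean's Bool order false < true)
def buscar_paises_por_nombre_alt (paises : List (List (String × String))) (termino : String) : List (List (String × String)) :=
  let t := PySem.Str.lower (PySem.Str.strip termino)
  let coincidencias := paises.filter (fun p => PySem.Str.isIn t (PySem.Str.lower (PySem.Str.strip (pvNombre p))))
  PySem.List.sorted coincidencias (fun p => PySem.Str.lower (PySem.Str.strip (pvNombre p)) != t)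

-- ===== PRECONDITION & SPEC =====
-- Pre_ excludes inputs where some pais lacks the key "nombre": there Python A raises KeyError.
def Pre_buscar_paises_por_nombre (paises : List (List (String × String))) (_termino : String) : Prop :=
  ∀ pais ∈ paises, pais.any (fun kv => kv.1 == "nombre") = true
instance (paises : List (List (String × String))) (termino : String) : Decidable (Pre_buscar_paises_por_nombre paises termino) := by unfold Pre_buscar_paises_por_nombre; infer_instance

def pvWitness_buscar_paises_por_nombre : (List (List (String × String))) × String :=
  ([[("nombre", " Peru "), ("capital", "Lima")], [("nombre", "Paraguay")]], "peru")

def Spec_buscar_paises_por_nombre (paises : List (List (String × String))) (termino : String) (out : List (List (String × String))) : Prop := out = buscar_paises_por_nombre_alt paises termino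
instance (paises : List (List (String × String))) (termino : String) (out : List (List (String × String))) : Decidable (Spec_buscar_paises_por_nombre paises termino out) := by unfold Spec_buscar_paises_por_nombre; infer_instance

-- ===== CLAIM =====
def Claim_equal_buscar_paises_por_nombre : Prop := ∀ (paises : List (List (String × String))) (termino : String), Dom_buscar_paises_por_nombre paises termino → Pre_buscar_paises_por_nombre paises termino → Spec_buscar_paises_por_nombre paises termino (buscar_paises_por_nombre paises termino)

-- ===== LEMMAS AND PROOFS =====

-- loop invariant: A's classifying fold over accumulators equals the two filters, prefixed
theorem pv_fold_filter (t : String) (l : List (List (String × String)))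
    (ex pa : List (List (String × String))) :
    l.foldl (fun (st : List (List (String × String)) × List (List (String × String))) pais =>
      let nombre := PySem.Str.lower (PySem.Str.strip (pvNombre pais))
      if nombre == t then (st.1 ++ [pais], st.2)
      else if PySem.Str.isIn t nombre then (st.1, st.2 ++ [pais])
      else st) (ex, pa)
    = (ex ++ l.filter (fun p => PySem.Str.lower (PySem.Str.strip (pvNombre p)) == t),
       pa ++ l.filter (fun p =>
         PySem.Str.isIn t (PySem.Str.lower (PySem.Str.strip (pvNombre p))) &&
         PySem.Str.lower (PySem.Str.strip (pvNombre p)) != t)) := by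
  induction l generalizing ex pa with
  | nil => simp
  | cons h tl ih =>
      simp only [List.foldl_cons, List.filter_cons]
      by_cases he : (PySem.Str.lower (PySem.Str.strip (pvNombre h)) == t) = true
      · simp only [he, bne, Bool.not_true, Bool.and_false, if_true,
          Bool.false_eq_true, if_false, ih, List.append_assoc, List.singleton_append]
      · have he' : (PySem.Str.lower (PySem.Str.strip (pvNombre h)) != t) = true := by
          simp only [bne]; exact (Bool.not_eq_true' _).mpr (Bool.eq_false_iff.mpr (fun hx => he hx))
        by_cases hin : PySem.Str.isIn t (PySem.Str.lower (PySem.Str.strip (pvNombre h))) = true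
        · simp only [he, hin, he', Bool.and_true, if_true,
            Bool.false_eq_true, if_false, ih, List.append_assoc, List.singleton_append]
        · have hin' : PySem.Str.isIn t (PySem.Str.lower (PySem.Str.strip (pvNombre h))) = false :=
            Bool.eq_false_iff.mpr (fun hx => hin hx)
          simp only [he, hin', Bool.false_and, Bool.false_eq_true, if_false, ih]

-- insertBy places x after all elements it is not 'before' and before all elements it is 'before'
theorem pv_insertBy_mid {α : Type} (before : α → α → Bool) (x : α) (a b : List α)
    (h0 : ∀ y ∈ a, before x y = false) (h1 : ∀ y ∈ b, before x y = true) :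
    PySem.List.insertBy before x (a ++ b) = a ++ x :: b := by
  induction a with
  | nil =>
      cases b with
      | nil => simp [PySem.List.insertBy]
      | cons hd tl => simp [PySem.List.insertBy, h1 hd (by simp)]
  | cons hd tl ih =>
      have := h0 hd (by simp)
      simp [PySem.List.insertBy, this, ih (fun y hy => h0 y (by simp [hy]))]

-- insertion sort with a boolean key, started from a split accumulator, keeps the split
theorem pv_foldl_insert_split {α : Type} (key : α → Bool) (l a b : List α)
    (ha : ∀ y ∈ a, key y = false) (hb : ∀ y ∈ b, key y = true) :
    l.foldl (fun acc x => PySem.List.insertBy (fun p q => decide (key p < key q)) x acc) (a ++ b)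
    = (a ++ l.filter (fun x => !key x)) ++ (b ++ l.filter key) := by
  induction l generalizing a b with
  | nil => simp
  | cons h tl ih =>
      simp only [List.foldl_cons, List.filter_cons]
      by_cases hk : key h = true
      · have hmid : PySem.List.insertBy (fun p q => decide (key p < key q)) h (a ++ b) = (a ++ b) ++ [h] := by
          apply PySem.List.insertBy_of_forall_not_before
          intro y hy
          simp only [hk]
          cases hky : key y <;> simp
        rw [hmid, List.append_assoc, ih a (b ++ [h]) ha
          (by intro y hy; rcases List.mem_append.mp hy with h' | h'
              · exact hb y h'
              · simp at h'; simp [h', hk])]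
        simp [hk, List.append_assoc]
      · have hk' : key h = false := Bool.eq_false_iff.mpr hk
        have hmid : PySem.List.insertBy (fun p q => decide (key p < key q)) h (a ++ b) = a ++ h :: b := by
          apply pv_insertBy_mid
          · intro y hy; simp [hk', ha y hy]
          · intro y hy; simp [hk', hb y hy]
        rw [hmid, show a ++ h :: b = (a ++ [h]) ++ b by simp,
          ih (a ++ [h]) b
          (by intro y hy; rcases List.mem_append.mp hy with h' | h'
              · exact ha y h'
              · simp at h'; simp [h', hk'])
          hb]
        simp [hk', List.append_assoc]

-- stable sort on a boolean key = false-group then true-group, each in original order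
theorem pv_sorted_bool {α : Type} (key : α → Bool) (l : List α) :
    PySem.List.sorted l key = l.filter (fun x => !key x) ++ l.filter key := by
  rw [PySem.List.sorted_eq_foldl_insertBy]
  have := pv_foldl_insert_split key l [] [] (by simp) (by simp)
  simpa using this

-- an exact match is in particular a substring match
theorem pv_eq_isIn (t n : String) (h : (n == t) = true) : PySem.Chars.isIn t.toList n.toList = true := by
  have hn : n = t := eq_of_beq h
  subst hn
  exact (PySem.Chars.isIn_iff_infix _ _).mpr (List.infix_refl _)

-- the concatenation of A's two groups equals B's filtered-sorted result, pointwise on the predicates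
theorem pv_main {α : Type} (f : α → String) (t : String) (l : List α) :
    l.filter (fun p => f p == t) ++ l.filter (fun p => PySem.Str.isIn t (f p) && f p != t)
    = (l.filter (fun p => PySem.Str.isIn t (f p))).filter (fun x => !(f x != t))
      ++ (l.filter (fun p => PySem.Str.isIn t (f p))).filter (fun p => f p != t) := by
  rw [List.filter_filter, List.filter_filter]
  congr 1
  · apply List.filter_congr
    intro p _
    by_cases he : (f p == t) = true
    · simp [he, bne, pv_eq_isIn t (f p) he]
    · simp [he, bne]
  · exact List.filter_congr (fun p _ => Bool.and_comm _ _)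

-- ===== VERDICT =====
theorem buscar_paises_por_nombre_spec : Claim_equal_buscar_paises_por_nombre := by
  intro paises termino _ _
  unfold Spec_buscar_paises_por_nombre buscar_paises_por_nombre buscar_paises_por_nombre_alt
  simp only [pv_fold_filter, List.nil_append, pv_sorted_bool]
  exact pv_main (fun p => PySem.Str.lower (PySem.Str.strip (pvNombre p))) (PySem.Str.lower (PySem.Str.strip termino)) paises
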